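-- pv_equiv track=rewrite | github.com/daniel-reich/turbo-robot | YDgtdP69Mn9pC73xN_1.py | num_grid
-- ===== SOURCE A (Python) =====
-- def num_grid(lst):
--     for i in range(len(lst)):
--         for j in range(len(lst[i])):
--             if lst[i][j] == '#':
--                 continue
--             lst[i][j] = str(sum(lst[k][l] == '#' for k in range(len(lst)) for l in range(len(lst[0]))
--                             if abs(i - k) < 2 and abs(j - l) < 2))
--     return lst
-- ===== SOURCE B (Python) =====
-- def num_grid(lst):
--     # Same return value as A on rectangular grids; mutates lst in place like A.
--     rows = len(lst)
--     src = [row[:] for row in lst]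
--     for i in range(rows):
--         for j in range(len(lst[i])):
--             if src[i][j] == '#':
--                 continue
--             cnt = 0
--             for k in range(max(0, i - 1), min(rows, i + 2)):
--                 row = src[k]
--                 for l in range(max(0, j - 1), min(len(row), j + 2)):
--                     if row[l] == '#':
--                         cnt += 1
--             lst[i][j] = str(cnt)
--     return lst
-- ===== Notes on version B (the rewrite author's own statement) =====
-- stated objective: faster
-- what changed: Per non-'#' cell, B scans only the clamped 3x3 neighborhood read from a copy of the input, instead of A's scan of the entire grid filtered by abs(i-k)<2 and abs(j-l)<2.
-- intended difference: On ragged grids holding a '#' in some row past the first row's width, A under-counts nearby non-'#' cells because its scan stops at len(lst[0]); B counts the full in-row neighborhood, which is the intended adjacency count. — e.g. on num_grid([["."], [".", "#"]]): A returns [["0"], ["0", "#"]], B returns [["1"], ["1", "#"]]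
import Mathlib
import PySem

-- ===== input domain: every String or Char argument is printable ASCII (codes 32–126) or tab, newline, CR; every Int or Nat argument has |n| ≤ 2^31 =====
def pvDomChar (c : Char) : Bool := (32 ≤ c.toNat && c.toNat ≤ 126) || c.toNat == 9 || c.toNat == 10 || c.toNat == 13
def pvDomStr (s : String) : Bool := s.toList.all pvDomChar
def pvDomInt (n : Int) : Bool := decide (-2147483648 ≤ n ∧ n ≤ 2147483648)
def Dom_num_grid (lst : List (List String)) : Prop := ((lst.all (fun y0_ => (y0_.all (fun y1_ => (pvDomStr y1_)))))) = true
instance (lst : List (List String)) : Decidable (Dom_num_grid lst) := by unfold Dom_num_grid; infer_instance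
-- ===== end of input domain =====

-- B replaces A's per-cell scan of the whole grid by a scan of only the clamped 3x3 neighborhood
-- (and on ragged grids counts the true in-row neighborhood instead of clipping at len(lst[0]), see D_).
-- Both Pythons mutate the argument list in place; the equivalence proved here is about the return value.

-- ===== PORT A =====
-- str(sum(lst[k][l] == '#' for k in range(len(lst)) for l in range(len(lst[0])) if abs(i-k) < 2 and abs(j-l) < 2))
-- (pyGetD defaults are never reached under Pre_num_grid, where every access is in range)
def aCount (g : List (List String)) (i j : Int) : Int :=
  (PySem.List.pyRange 0 (g.length : Int) 1).foldl (fun acc k =>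
    (PySem.List.pyRange 0 (((PySem.List.pyGetD g 0 []).length : Int)) 1).foldl (fun acc2 l =>
      if (i - k).natAbs < 2 ∧ (j - l).natAbs < 2 then
        acc2 + (if PySem.List.pyGetD (PySem.List.pyGetD g k []) l "" = "#" then 1 else 0)
      else acc2) acc) 0

-- A's loop body: "if lst[i][j] == '#': continue" else "lst[i][j] = str(sum(...))"
def aStep (i : Int) (g2 : List (List String)) (j : Int) : List (List String) :=
  if PySem.List.pyGetD (PySem.List.pyGetD g2 i []) j "" = "#" then g2
  else PySem.List.pySetD g2 i
    (PySem.List.pySetD (PySem.List.pyGetD g2 i []) j (PySem.Int.toStr (aCount g2 i j)))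

-- A's inner loop "for j in range(len(lst[i]))" over the current grid g
def aInner (i : Int) (g : List (List String)) : List (List String) :=
  (PySem.List.pyRange 0 (((PySem.List.pyGetD g i []).length : Int)) 1).foldl (aStep i) g

def num_grid (lst : List (List String)) : List (List String) :=
  (PySem.List.pyRange 0 (lst.length : Int) 1).foldl (fun g i => aInner i g) lst

-- ===== PORT B =====
-- cnt over k in range(max(0,i-1), min(rows,i+2)) and l in range(max(0,j-1), min(len(row),j+2)) of src[k][l] == '#'
def bCount (src : List (List String)) (rows i j : Int) : Int :=
  (PySem.List.pyRange (max 0 (i - 1)) (min rows (i + 2)) 1).foldl (fun acc k =>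
    (PySem.List.pyRange (max 0 (j - 1)) (min ((PySem.List.pyGetD src k []).length : Int) (j + 2)) 1).foldl
      (fun acc2 l =>
        if PySem.List.pyGetD (PySem.List.pyGetD src k []) l "" = "#" then acc2 + 1 else acc2) acc) 0

-- B reads every count from the untouched copy src, so the result is cell-by-cell a map of the input
def num_grid_alt (lst : List (List String)) : List (List String) :=
  lst.mapIdx (fun i row => row.mapIdx (fun j c =>
    if c = "#" then c
    else PySem.Int.toStr (bCount lst (lst.length : Int) (i : Int) (j : Int))))

-- ===== PRECONDITION & SPEC =====
-- cell (k,l) of a grid, with out-of-range default ""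
def pvCell (g : List (List String)) (k l : Nat) : String := (g.getD k []).getD l ""

-- Pre_ excludes exactly the grids on which A raises IndexError: ragged grids where some non-'#'
-- cell has a neighborhood position inside the first row's width but past its own row's length.
def Pre_num_grid (lst : List (List String)) : Prop :=
  ¬ ∃ i < lst.length, ∃ j < (lst.getD i []).length,
      pvCell lst i j ≠ "#" ∧
      ∃ k < lst.length, (k ≤ i + 1 ∧ i ≤ k + 1) ∧
      ∃ l < (lst.headD []).length, (l ≤ j + 1 ∧ j ≤ l + 1) ∧ (lst.getD k []).length ≤ l
instance (lst : List (List String)) : Decidable (Pre_num_grid lst) := by unfold Pre_num_grid; infer_instance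
def pvWitness_num_grid : List (List String) := [[".", "#"], ["#", "."]]

-- On ragged grids holding a '#' in some row past the first row's width, A's count of a nearby
-- non-'#' cell misses that '#' (its scan stops at len(lst[0])); B counts the full in-row
-- neighborhood, which is the intended adjacency count.
def D_num_grid (lst : List (List String)) : Prop :=
  ∃ k < lst.length, ∃ l < (lst.getD k []).length,
    (lst.headD []).length ≤ l ∧ pvCell lst k l = "#"
instance (lst : List (List String)) : Decidable (D_num_grid lst) := by unfold D_num_grid; infer_instance

def Spec_num_grid (lst : List (List String)) (out : List (List String)) : Prop := ¬ D_num_grid lst → out = num_grid_alt lst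
instance (lst : List (List String)) (out : List (List String)) : Decidable (Spec_num_grid lst out) := by unfold Spec_num_grid; infer_instance

def pvDiffWitness_num_grid : List (List String) := [["."], [".", "#"]]
def pvDiffWitnessOut_num_grid : (List (List String)) × (List (List String)) :=
  ([["0"], ["0", "#"]], [["1"], ["1", "#"]])

-- ===== CLAIM (what is proved, stated in full; the proofs are below) =====
def Claim_unchanged_num_grid : Prop := ∀ (lst : List (List String)), Dom_num_grid lst → Pre_num_grid lst → Spec_num_grid lst (num_grid lst)
def Claim_changed_num_grid : Prop := Dom_num_grid (pvDiffWitness_num_grid) ∧ Pre_num_grid (pvDiffWitness_num_grid) ∧ D_num_grid (pvDiffWitness_num_grid) ∧ num_grid (pvDiffWitness_num_grid) = pvDiffWitnessOut_num_grid.1 ∧ num_grid_alt (pvDiffWitness_num_grid) = pvDiffWitnessOut_num_grid.2 ∧ pvDiffWitnessOut_num_grid.1 ≠ pvDiffWitnessOut_num_grid.2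

-- ===== LEMMAS AND PROOFS =====

-- invariant of A's sweep: shape kept, cells lexicographically before (i,j) rewritten, the rest untouched
def PartialA (lst g : List (List String)) (i j : Nat) : Prop :=
  g.length = lst.length ∧
  (∀ k, (g.getD k []).length = (lst.getD k []).length) ∧
  (∀ k l, pvCell g k l =
    if k < lst.length ∧ l < (lst.getD k []).length ∧ (k < i ∨ (k = i ∧ l < j)) ∧ pvCell lst k l ≠ "#"
    then PySem.Int.toStr (aCount lst (k : Int) (l : Int)) else pvCell lst k l)

theorem foldl_if_add {α : Type} (l : List α) (p : α → Prop) [DecidablePred p] (f : α → Int) (a : Int) :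
    l.foldl (fun acc x => if p x then acc + f x else acc) a
      = a + (l.map (fun x => if p x then f x else 0)).sum := by
  induction l generalizing a with
  | nil => simp
  | cons x t ih =>
    simp only [List.foldl_cons, List.map_cons, List.sum_cons, ih]
    by_cases h : p x
    · simp [h]; ring
    · simp [h]

theorem aCount_eq_sum (g : List (List String)) (i j : Int) :
    aCount g i j =
      ((PySem.List.pyRange 0 (g.length : Int) 1).map (fun k =>
        ((PySem.List.pyRange 0 ((PySem.List.pyGetD g 0 []).length : Int) 1).map (fun l =>
          if (i - k).natAbs < 2 ∧ (j - l).natAbs < 2 then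
            (if PySem.List.pyGetD (PySem.List.pyGetD g k []) l "" = "#" then (1:Int) else 0) else 0)).sum)).sum := by
  unfold aCount
  simp only [foldl_if_add, PySem.List.foldl_add, zero_add]

theorem bCount_eq_sum (src : List (List String)) (rows i j : Int) :
    bCount src rows i j =
      ((PySem.List.pyRange (max 0 (i - 1)) (min rows (i + 2)) 1).map (fun k =>
        ((PySem.List.pyRange (max 0 (j - 1)) (min ((PySem.List.pyGetD src k []).length : Int) (j + 2)) 1).map
          (fun l => if PySem.List.pyGetD (PySem.List.pyGetD src k []) l "" = "#" then (1:Int) else 0)).sum)).sum := by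
  unfold bCount
  simp only [foldl_if_add, PySem.List.foldl_add, zero_add]

-- clip an indicator-restricted sum over [0,n) to the clamped window

theorem sum_window (n lo hi : Int) (f : Int → Int) :
    ((PySem.List.pyRange 0 n 1).map (fun x => if lo ≤ x ∧ x < hi then f x else 0)).sum
      = ((PySem.List.pyRange (max 0 lo) (min n hi) 1).map f).sum := by
  rcases le_or_gt (min n hi) (max 0 lo) with hba | hab
  · rw [PySem.List.pyRange_one_eq_nil hba]
    refine List.sum_eq_zero ?_ |>.trans (by simp)
    intro x hx
    simp only [List.mem_map] at hx
    obtain ⟨y, hy, rfl⟩ := hx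
    rw [PySem.List.mem_pyRange_one] at hy
    rw [if_neg (by omega)]
  · have h0a : (0:Int) ≤ max 0 lo := by omega
    have hbn : min n hi ≤ n := by omega
    rw [PySem.List.pyRange_one_append 0 (max 0 lo) n h0a (by omega),
        PySem.List.pyRange_one_append (max 0 lo) (min n hi) n (by omega) hbn]
    simp only [List.map_append, List.sum_append]
    have e1 : ((PySem.List.pyRange 0 (max 0 lo)).map (fun x => if lo ≤ x ∧ x < hi then f x else 0)).sum = 0 := by
      refine List.sum_eq_zero ?_
      intro x hx
      simp only [List.mem_map] at hx
      obtain ⟨y, hy, rfl⟩ := hx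
      rw [PySem.List.mem_pyRange_one] at hy
      rw [if_neg (by omega)]
    have e3 : ((PySem.List.pyRange (min n hi) n).map (fun x => if lo ≤ x ∧ x < hi then f x else 0)).sum = 0 := by
      refine List.sum_eq_zero ?_
      intro x hx
      simp only [List.mem_map] at hx
      obtain ⟨y, hy, rfl⟩ := hx
      rw [PySem.List.mem_pyRange_one] at hy
      rw [if_neg (by omega)]
    have e2 : ((PySem.List.pyRange (max 0 lo) (min n hi)).map (fun x => if lo ≤ x ∧ x < hi then f x else 0))
        = ((PySem.List.pyRange (max 0 lo) (min n hi)).map f) := by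
      refine List.map_congr_left ?_
      intro x hx
      rw [PySem.List.mem_pyRange_one] at hx
      rw [if_pos (by omega)]
    rw [e1, e2, e3]
    ring


theorem digitChar_ne (m : Nat) : Nat.digitChar m ≠ '#' := by
  rcases Nat.lt_or_ge m 16 with h | h
  · interval_cases m <;> decide
  · have e : Nat.digitChar m = '*' := by
      unfold Nat.digitChar
      rw [if_neg (by omega), if_neg (by omega), if_neg (by omega), if_neg (by omega),
          if_neg (by omega), if_neg (by omega), if_neg (by omega), if_neg (by omega),
          if_neg (by omega), if_neg (by omega), if_neg (by omega), if_neg (by omega),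
          if_neg (by omega), if_neg (by omega), if_neg (by omega), if_neg (by omega)]
    rw [e]; decide

theorem toDigitsCore_ne (b f : Nat) : ∀ (n : Nat) (acc : List Char),
    '#' ∉ acc → '#' ∉ Nat.toDigitsCore b f n acc := by
  induction f with
  | zero => intro n acc h; simpa [Nat.toDigitsCore] using h
  | succ f ih =>
    intro n acc h
    simp only [Nat.toDigitsCore]
    split
    · intro hm
      rcases List.mem_cons.mp hm with h1 | h2
      · exact digitChar_ne _ h1.symm
      · exact h h2
    · refine ih _ _ ?_
      intro hm
      rcases List.mem_cons.mp hm with h1 | h2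
      · exact digitChar_ne _ h1.symm
      · exact h h2

theorem toStr_ne_hash (n : Int) (hn : 0 ≤ n) : PySem.Int.toStr n ≠ "#" := by
  intro h
  have h2 : (PySem.Int.toStr n).toList = "#".toList := by rw [h]
  rw [PySem.Int.toList_toStr] at h2
  simp only [PySem.Int.toChars, if_neg (by omega : ¬ n < 0)] at h2
  have hm : '#' ∈ Nat.toDigits 10 n.toNat := by rw [h2]; simp
  exact toDigitsCore_ne 10 _ _ _ (by simp) hm

theorem aCount_nonneg (g : List (List String)) (i j : Int) : 0 ≤ aCount g i j := by
  rw [aCount_eq_sum]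
  refine List.sum_nonneg ?_
  intro x hx
  simp only [List.mem_map] at hx
  obtain ⟨k, _, rfl⟩ := hx
  refine List.sum_nonneg ?_
  intro y hy
  simp only [List.mem_map] at hy
  obtain ⟨l, _, rfl⟩ := hy
  split_ifs <;> norm_num

theorem getD_set {α : Type} (xs : List α) (n k : Nat) (v d : α) :
    (xs.set n v).getD k d = if k = n ∧ n < xs.length then v else xs.getD k d := by
  simp only [List.getD_eq_getElem?_getD, List.getElem?_set]
  split_ifs with h1 h2 h3 <;> simp_all

theorem pyGetD_nat2 (g : List (List String)) (k l : Int) (hk : 0 ≤ k) (hl : 0 ≤ l) :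
    PySem.List.pyGetD (PySem.List.pyGetD g k []) l "" = pvCell g k.toNat l.toNat := by
  have ek : k = ((k.toNat : Nat) : Int) := by omega
  have el : l = ((l.toNat : Nat) : Int) := by omega
  rw [ek, el, PySem.List.pyGetD_natCast, PySem.List.pyGetD_natCast]
  rfl

theorem headD_len (lst : List (List String)) : lst.headD [] = lst.getD 0 [] := by
  cases lst <;> rfl

-- a sum over [c,b) only changes with b through indices whose term is nonzero
theorem sum_zero_on (a b : Int) (f : Int → Int)
    (h : ∀ l : Int, a ≤ l → l < b → f l = 0) :
    ((PySem.List.pyRange a b 1).map f).sum = 0 := by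
  refine List.sum_eq_zero ?_
  intro x hx
  simp only [List.mem_map] at hx
  obtain ⟨l, hl, rfl⟩ := hx
  rw [PySem.List.mem_pyRange_one] at hl
  exact h l hl.1 hl.2

theorem sum_range_extend (c b1 b2 : Int) (f : Int → Int)
    (h : ∀ l : Int, min b1 b2 ≤ l → l < max b1 b2 → c ≤ l → f l = 0) :
    ((PySem.List.pyRange c b1 1).map f).sum = ((PySem.List.pyRange c b2 1).map f).sum := by
  have key : ∀ x y : Int, x ≤ y →
      (∀ l : Int, min x y ≤ l → l < max x y → c ≤ l → f l = 0) →
      ((PySem.List.pyRange c x 1).map f).sum = ((PySem.List.pyRange c y 1).map f).sum := by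
    intro x y hxy hz
    rcases le_total x c with hc | hc
    · rw [PySem.List.pyRange_one_eq_nil hc]
      symm
      simpa using sum_zero_on c y f (fun l hl1 hl2 => hz l (by omega) (by omega) hl1)
    · rw [PySem.List.pyRange_one_append c x y hc hxy, List.map_append, List.sum_append,
          sum_zero_on x y f (fun l hl1 hl2 => hz l (by omega) (by omega) (by omega)), add_zero]
  rcases le_total b1 b2 with hb | hb
  · exact key b1 b2 hb h
  · exact (key b2 b1 hb (fun l h1 h2 h3 => h l (by omega) (by omega) h3)).symm

theorem count_eq (lst : List (List String)) (i j : Nat) (hi : i < lst.length)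
    (hdiff : ¬ D_num_grid lst) :
    aCount lst (i : Int) (j : Int) = bCount lst (lst.length : Int) (i : Int) (j : Int) := by
  rw [aCount_eq_sum, bCount_eq_sum]
  set R : Int := (lst.length : Int) with hR
  set C : Int := ((PySem.List.pyGetD lst 0 []).length : Int) with hCdef
  set ind : Int → Int → Int := fun k l =>
    if PySem.List.pyGetD (PySem.List.pyGetD lst k []) l "" = "#" then (1:Int) else 0 with hind
  have step1 : ∀ k : Int,
      ((PySem.List.pyRange 0 C 1).map (fun l =>
        if ((i:Int) - k).natAbs < 2 ∧ ((j:Int) - l).natAbs < 2 then ind k l else 0)).sum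
      = (if (i:Int) - 1 ≤ k ∧ k < (i:Int) + 2 then
          ((PySem.List.pyRange (max 0 ((j:Int) - 1)) (min C ((j:Int) + 2)) 1).map (ind k)).sum else 0) := by
    intro k
    by_cases hk : (i:Int) - 1 ≤ k ∧ k < (i:Int) + 2
    · rw [if_pos hk, ← sum_window C ((j:Int)-1) ((j:Int)+2) (ind k)]
      refine congrArg _ (List.map_congr_left ?_)
      intro l _
      refine if_congr ?_ rfl rfl
      constructor
      · rintro ⟨_, h2⟩; omega
      · rintro ⟨h1, h2⟩; exact ⟨by omega, by omega⟩
    · rw [if_neg hk]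
      refine List.sum_eq_zero ?_
      intro x hx
      simp only [List.mem_map] at hx
      obtain ⟨l, _, rfl⟩ := hx
      rw [if_neg (by omega)]
  have lhs2 :
      ((PySem.List.pyRange 0 R 1).map (fun k =>
        ((PySem.List.pyRange 0 C 1).map (fun l =>
          if ((i:Int) - k).natAbs < 2 ∧ ((j:Int) - l).natAbs < 2 then ind k l else 0)).sum)).sum
      = ((PySem.List.pyRange (max 0 ((i:Int) - 1)) (min R ((i:Int) + 2)) 1).map (fun k =>
          ((PySem.List.pyRange (max 0 ((j:Int) - 1)) (min C ((j:Int) + 2)) 1).map (ind k)).sum)).sum := by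
    rw [List.map_congr_left (fun k _ => step1 k)]
    exact sum_window R ((i:Int)-1) ((i:Int)+2)
      (fun k => ((PySem.List.pyRange (max 0 ((j:Int) - 1)) (min C ((j:Int) + 2)) 1).map (ind k)).sum)
  rw [lhs2]
  refine congrArg _ (List.map_congr_left ?_)
  intro k hk
  rw [PySem.List.mem_pyRange_one] at hk
  have hrowk : PySem.List.pyGetD lst k [] = lst.getD k.toNat [] :=
    PySem.List.pyGetD_of_nonneg lst [] (by omega)
  -- the window past min C (j+2): the term is 0 ('' past the row, and a '#' would witness pvDiff)
  refine sum_range_extend _ _ _ _ ?_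
  intro l h1 h2 h3
  simp only [hind]
  by_cases hLk : ((PySem.List.pyGetD lst k []).length : Int) ≤ l
  · rw [if_neg ?_]
    rw [PySem.List.pyGetD_of_nonneg _ "" (by omega : (0:Int) ≤ l),
        List.getD_eq_default _ _ (by omega : (PySem.List.pyGetD lst k []).length ≤ l.toNat)]
    decide
  · rw [not_le] at hLk
    by_cases hhash : PySem.List.pyGetD (PySem.List.pyGetD lst k []) l "" = "#"
    · exfalso
      apply hdiff
      have hCle : C ≤ l := by omega
      refine ⟨k.toNat, by omega, l.toNat, ?_, ?_, ?_⟩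
      · rw [← hrowk]; omega
      · rw [headD_len]
        have hC0 : C = ((lst.getD 0 []).length : Int) := by
          rw [hCdef, PySem.List.pyGetD_zero]
        omega
      · rw [← pyGetD_nat2 lst k l (by omega) (by omega)]
        exact hhash
    · rw [if_neg hhash]

theorem aCount_congr (g lst : List (List String))
    (hlen : g.length = lst.length)
    (hrow : ∀ k, (g.getD k []).length = (lst.getD k []).length)
    (hhash : ∀ k l : Nat, (pvCell g k l = "#") ↔ (pvCell lst k l = "#"))
    (i j : Int) : aCount g i j = aCount lst i j := by
  rw [aCount_eq_sum, aCount_eq_sum, hlen]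
  have h0 : (PySem.List.pyGetD g 0 []).length = (PySem.List.pyGetD lst 0 []).length := by
    rw [PySem.List.pyGetD_zero, PySem.List.pyGetD_zero]; exact hrow 0
  rw [h0]
  refine congrArg _ (List.map_congr_left ?_)
  intro k hk
  rw [PySem.List.mem_pyRange_one] at hk
  refine congrArg _ (List.map_congr_left ?_)
  intro l hl
  rw [PySem.List.mem_pyRange_one] at hl
  refine if_congr Iff.rfl ?_ rfl
  rw [pyGetD_nat2 g k l (by omega) (by omega), pyGetD_nat2 lst k l (by omega) (by omega)]
  refine if_congr (hhash _ _) rfl rfl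

theorem partial_hash (lst g : List (List String)) (i j : Nat) (h : PartialA lst g i j) :
    ∀ k l : Nat, (pvCell g k l = "#") ↔ (pvCell lst k l = "#") := by
  intro k l
  rw [h.2.2 k l]
  split_ifs with hc
  · have hne := toStr_ne_hash _ (aCount_nonneg lst (k : Int) (l : Int))
    constructor
    · intro he; exact absurd he hne
    · intro he; exact absurd he hc.2.2.2
  · exact Iff.rfl

theorem aStep_partial (lst g : List (List String)) (i j : Nat)
    (hi : i < lst.length) (hj : j < (lst.getD i []).length)
    (h : PartialA lst g i j) : PartialA lst (aStep (i : Int) g (j : Int)) i (j + 1) := by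
  obtain ⟨h1, h2, h3⟩ := h
  have hcell : PySem.List.pyGetD (PySem.List.pyGetD g (i : Int) []) (j : Int) "" = pvCell g i j := by
    rw [pyGetD_nat2 g _ _ (by omega) (by omega)]; simp
  have hgij : pvCell g i j = pvCell lst i j := by
    rw [h3 i j, if_neg]; rintro ⟨_, _, hc, _⟩; omega
  unfold aStep
  rw [hcell, hgij]
  by_cases hhash : pvCell lst i j = "#"
  · rw [if_pos hhash]
    refine ⟨h1, h2, ?_⟩
    intro k l
    rw [h3 k l]
    refine if_congr ⟨?_, ?_⟩ rfl rfl
    · rintro ⟨a, b, c, d⟩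
      refine ⟨a, b, ?_, d⟩
      rcases c with c | ⟨rfl, c⟩
      · exact Or.inl c
      · exact Or.inr ⟨rfl, by omega⟩
    · rintro ⟨a, b, c, d⟩
      refine ⟨a, b, ?_, d⟩
      rcases c with c | ⟨rfl, c⟩
      · exact Or.inl c
      · by_cases hl : l = j
        · subst hl; exact absurd hhash d
        · exact Or.inr ⟨rfl, by omega⟩
  · rw [if_neg hhash]
    have hcnt : aCount g (i : Int) (j : Int) = aCount lst (i : Int) (j : Int) :=
      aCount_congr g lst h1 h2 (partial_hash lst g i j ⟨h1, h2, h3⟩) _ _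
    have hrowg : PySem.List.pyGetD g (i : Int) [] = g.getD i [] := PySem.List.pyGetD_natCast g i []
    rw [hrowg, hcnt, PySem.List.pySetD_natCast, PySem.List.pySetD_natCast]
    set v := PySem.Int.toStr (aCount lst (i : Int) (j : Int)) with hv
    have hvne : v ≠ "#" := toStr_ne_hash _ (aCount_nonneg lst _ _)
    have hjg : j < (g.getD i []).length := by rw [h2 i]; exact hj
    have hig : i < g.length := by rw [h1]; exact hi
    refine ⟨by simp [h1], ?_, ?_⟩
    · intro k
      rw [getD_set g i k _ []]
      split_ifs with hk
      · rw [hk.1, List.length_set, h2 i]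
      · exact h2 k
    · intro k l
      unfold pvCell
      rw [getD_set g i k _ []]
      by_cases hk : k = i ∧ i < g.length
      · rw [if_pos hk, getD_set (g.getD i []) j l v ""]
        obtain ⟨rfl, _⟩ := hk
        by_cases hl : l = j ∧ j < (g.getD k []).length
        · obtain ⟨rfl, _⟩ := hl
          rw [if_pos ⟨rfl, hjg⟩, if_pos ⟨hi, hj, Or.inr ⟨rfl, by omega⟩, hhash⟩]
        · have hlj : ¬ (l = j ∧ j < (g.getD k []).length) := hl
          rw [if_neg hlj]
          have := h3 k l
          unfold pvCell at this
          rw [this]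
          refine if_congr ⟨?_, ?_⟩ rfl rfl
          · rintro ⟨a, b, c, d⟩
            refine ⟨a, b, ?_, d⟩
            rcases c with c | ⟨_, c⟩
            · omega
            · exact Or.inr ⟨rfl, by omega⟩
          · rintro ⟨a, b, c, d⟩
            refine ⟨a, b, ?_, d⟩
            rcases c with c | ⟨_, c⟩
            · omega
            · have hlj2 : l ≠ j := by
                intro he
                exact hlj ⟨he, hjg⟩
              exact Or.inr ⟨rfl, by omega⟩
      · rw [if_neg hk]
        have := h3 k l
        unfold pvCell at this
        rw [this]
        have hki : k ≠ i := by
          intro he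
          exact hk ⟨he, hig⟩
        refine if_congr ⟨?_, ?_⟩ rfl rfl
        · rintro ⟨a, b, c, d⟩
          exact ⟨a, b, by omega, d⟩
        · rintro ⟨a, b, c, d⟩
          exact ⟨a, b, by omega, d⟩

theorem aInner_suffix (lst : List (List String)) (i : Nat) (hi : i < lst.length) :
    ∀ (n b : Nat) (g : List (List String)), b + n = (lst.getD i []).length →
    PartialA lst g i b →
    PartialA lst
      ((PySem.List.pyRange (b : Int) ((lst.getD i []).length : Int) 1).foldl (aStep (i : Int)) g)
      i ((lst.getD i []).length) := by
  intro n
  induction n with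
  | zero =>
    intro b g hb h
    rw [PySem.List.pyRange_one_eq_nil (by omega)]
    simp only [List.foldl_nil]
    obtain rfl : b = (lst.getD i []).length := by omega
    exact h
  | succ n ih =>
    intro b g hb h
    rw [PySem.List.pyRange_one_cons (by omega : (b : Int) < ((lst.getD i []).length : Int))]
    rw [List.foldl_cons]
    have hstep := aStep_partial lst g i b hi (by omega) h
    have : ((b : Int) + 1) = (((b + 1 : Nat)) : Int) := by omega
    rw [this]
    exact ih (b + 1) _ (by omega) hstep

theorem partial_shift (lst g : List (List String)) (i : Nat)
    (h : PartialA lst g i ((lst.getD i []).length)) : PartialA lst g (i + 1) 0 := by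
  obtain ⟨h1, h2, h3⟩ := h
  refine ⟨h1, h2, ?_⟩
  intro k l
  rw [h3 k l]
  refine if_congr ⟨?_, ?_⟩ rfl rfl
  · rintro ⟨a, b, c, d⟩
    refine ⟨a, b, ?_, d⟩
    rcases c with c | ⟨rfl, c⟩ <;> omega
  · rintro ⟨a, b, c, d⟩
    refine ⟨a, b, ?_, d⟩
    rcases c with c | c
    · by_cases hk : k = i
      · subst hk; exact Or.inr ⟨rfl, by omega⟩
      · exact Or.inl (by omega)
    · omega
  -- note: l < 0 is impossible, so the (i+1,0) condition is just k < i+1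

theorem aInner_partial (lst g : List (List String)) (i : Nat) (hi : i < lst.length)
    (h : PartialA lst g i 0) : PartialA lst (aInner (i : Int) g) (i + 1) 0 := by
  unfold aInner
  have hrow : PySem.List.pyGetD g (i : Int) [] = g.getD i [] := PySem.List.pyGetD_natCast g i []
  have hlen : ((PySem.List.pyGetD g (i : Int) []).length : Int) = ((lst.getD i []).length : Int) := by
    rw [hrow, h.2.1 i]
  rw [hlen]
  have h0 : ((0 : Nat) : Int) = (0 : Int) := rfl
  refine partial_shift lst _ i ?_
  have := aInner_suffix lst i hi ((lst.getD i []).length) 0 g (by omega) h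
  simpa using this

theorem outer_suffix (lst : List (List String)) :
    ∀ (n a : Nat) (g : List (List String)), a + n = lst.length →
    PartialA lst g a 0 →
    PartialA lst
      ((PySem.List.pyRange (a : Int) (lst.length : Int) 1).foldl (fun g i => aInner i g) g)
      lst.length 0 := by
  intro n
  induction n with
  | zero =>
    intro a g ha h
    rw [PySem.List.pyRange_one_eq_nil (by omega)]
    simp only [List.foldl_nil]
    obtain rfl : a = lst.length := by omega
    exact h
  | succ n ih =>
    intro a g ha h
    rw [PySem.List.pyRange_one_cons (by omega : (a : Int) < (lst.length : Int))]
    rw [List.foldl_cons]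
    have hstep := aInner_partial lst g a (by omega) h
    have : ((a : Int) + 1) = (((a + 1 : Nat)) : Int) := by omega
    rw [this]
    exact ih (a + 1) _ (by omega) hstep

theorem num_grid_partial (lst : List (List String)) :
    PartialA lst (num_grid lst) lst.length 0 := by
  unfold num_grid
  have h0 : PartialA lst lst 0 0 := by
    refine ⟨rfl, fun _ => rfl, ?_⟩
    intro k l
    rw [if_neg]
    rintro ⟨_, _, c, _⟩
    rcases c with c | ⟨_, c⟩ <;> omega
  have := outer_suffix lst lst.length 0 lst (by omega) h0
  simpa using this

theorem main_eq (lst : List (List String)) (hdiff : ¬ D_num_grid lst) :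
    num_grid lst = num_grid_alt lst := by
  obtain ⟨h1, h2, h3⟩ := num_grid_partial lst
  refine List.ext_getElem ?_ ?_
  · rw [h1]; unfold num_grid_alt; rw [List.length_mapIdx]
  · intro i hi1 hi2
    have hiR : i < lst.length := by rw [← h1]; exact hi1
    unfold num_grid_alt
    rw [List.getElem_mapIdx]
    refine List.ext_getElem ?_ ?_
    · rw [List.length_mapIdx]
      have := h2 i
      rw [List.getD_eq_getElem (num_grid lst) [] hi1, List.getD_eq_getElem lst [] hiR] at this
      exact this
    · intro j hj1 hj2
      have hjlen : j < (lst.getD i []).length := by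
        rw [List.getD_eq_getElem lst [] hiR]
        simpa [List.length_mapIdx] using hj2
      rw [List.getElem_mapIdx]
      have hcell : ((num_grid lst)[i]'hi1)[j]'hj1 = pvCell (num_grid lst) i j := by
        unfold pvCell
        rw [List.getD_eq_getElem (num_grid lst) [] hi1,
            List.getD_eq_getElem ((num_grid lst)[i]'hi1) "" hj1]
      have hj' : j < (lst[i]'hiR).length := by
        rw [List.getD_eq_getElem lst [] hiR] at hjlen; exact hjlen
      have hlstc : (lst[i]'hiR)[j]'hj' = pvCell lst i j := by
        unfold pvCell
        rw [List.getD_eq_getElem (lst.getD i []) "" hjlen]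
        simp [List.getElem?_eq_getElem hiR]
      rw [hcell, h3 i j]
      by_cases hhash : pvCell lst i j = "#"
      · rw [if_neg (by rintro ⟨_, _, _, d⟩; exact d hhash), hhash]
        rw [if_pos (by rw [hlstc]; exact hhash)]
        rw [hlstc, hhash]
      · rw [if_pos ⟨hiR, hjlen, Or.inl hiR, hhash⟩]
        rw [if_neg (by rw [hlstc]; exact hhash)]
        rw [count_eq lst i j hiR hdiff]

-- ===== VERDICT (by name: the statements are the Claim_ definitions above) =====
theorem num_grid_spec : Claim_unchanged_num_grid := by
  intro lst _hDom hPre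
  unfold Spec_num_grid
  intro hD
  exact main_eq lst hD

theorem num_grid_changed : Claim_changed_num_grid := by
  unfold Claim_changed_num_grid; decide
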